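-- pv_equiv track=rewrite | github.com/deepmodeling/dpgen2 | dpgen2/fp/abacus.py | get_suffix_calculation
-- ===== SOURCE A (Python) =====
-- from typing import (
--     List,
-- )
-- from typing import (
--     Tuple,
-- )
--
-- def get_suffix_calculation(INPUT: List[str]) -> Tuple[str, str]:
--     suffix = "ABACUS"
--     calculation = "scf"
--     for iline in INPUT:
--         sline = iline.split("#")[0].split()
--         if len(sline) >= 2 and sline[0].lower() == "suffix":
--             suffix = sline[1].strip()
--         elif len(sline) >= 2 and sline[0].lower() == "calculation":
--             calculation = sline[1].strip()
--     return suffix, calculation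
-- ===== SOURCE B (Python) =====
-- from typing import List, Tuple
--
-- def get_suffix_calculation(INPUT: List[str]) -> Tuple[str, str]:
--     def find_last(key: str, default: str) -> str:
--         # first match scanning backwards = last occurrence forwards
--         for iline in reversed(INPUT):
--             sline = iline.split("#")[0].split()
--             if len(sline) >= 2 and sline[0].lower() == key:
--                 return sline[1].strip()
--         return default
--     return find_last("suffix", "ABACUS"), find_last("calculation", "scf")
-- ===== Notes on version B (the rewrite author's own statement) =====
-- stated objective: alternative
-- what changed: Instead of one forward pass branch-updating two accumulators, B runs an independent backward search per key with early exit: the first match scanning the lines in reverse is the last occurrence, so no accumulator is kept at all.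
import Mathlib
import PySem

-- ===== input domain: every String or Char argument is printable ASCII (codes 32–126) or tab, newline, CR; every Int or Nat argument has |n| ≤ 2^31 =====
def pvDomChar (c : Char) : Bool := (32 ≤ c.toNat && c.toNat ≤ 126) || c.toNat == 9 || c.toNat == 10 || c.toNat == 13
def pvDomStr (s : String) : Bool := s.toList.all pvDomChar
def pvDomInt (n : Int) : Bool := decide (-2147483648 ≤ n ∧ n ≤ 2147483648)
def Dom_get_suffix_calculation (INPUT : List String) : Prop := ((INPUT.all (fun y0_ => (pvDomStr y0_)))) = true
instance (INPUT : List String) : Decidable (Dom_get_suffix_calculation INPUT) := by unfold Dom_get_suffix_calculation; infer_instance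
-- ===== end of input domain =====

-- B replaces A's single forward pass with two branch-updated accumulators by an
-- independent backward search per key with early exit (objective: alternative).

-- ===== PORT A =====
def get_suffix_calculation (INPUT : List String) : String × String :=
  INPUT.foldl (fun (st : String × String) iline =>
    let sline := PySem.Str.split₀ ((((PySem.Str.split? iline "#").getD []).head?.getD ""))
    match sline with
    | a :: b :: _ =>
      if PySem.Str.lower a = "suffix" then (PySem.Str.strip b, st.2)
      else if PySem.Str.lower a = "calculation" then (st.1, PySem.Str.strip b)
      else st
    | _ => st) ("ABACUS", "scf")

-- ===== PORT B =====
-- first match scanning backwards = last occurrence forwards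
def pvFindLast (key dflt : String) : List String → String
  | [] => dflt
  | iline :: rest =>
    let sline := PySem.Str.split₀ ((((PySem.Str.split? iline "#").getD []).head?.getD ""))
    if 2 ≤ sline.length ∧ PySem.Str.lower (sline.head?.getD "") = key then
      PySem.Str.strip (sline.getD 1 "")
    else pvFindLast key dflt rest

def get_suffix_calculation_alt (INPUT : List String) : String × String :=
  (pvFindLast "suffix" "ABACUS" INPUT.reverse,
   pvFindLast "calculation" "scf" INPUT.reverse)

-- ===== PRECONDITION & SPEC =====
def Spec_get_suffix_calculation (INPUT : List String) (out : String × String) : Prop := out = get_suffix_calculation_alt INPUT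
instance (INPUT : List String) (out : String × String) : Decidable (Spec_get_suffix_calculation INPUT out) := by unfold Spec_get_suffix_calculation; infer_instance

-- ===== CLAIM (what is proved, stated in full; the proofs are below) =====
def Claim_equal_get_suffix_calculation : Prop := ∀ (INPUT : List String), Dom_get_suffix_calculation INPUT → Spec_get_suffix_calculation INPUT (get_suffix_calculation INPUT)

-- ===== LEMMAS AND PROOFS =====

theorem pvFindLast_append (key dflt : String) (xs ys : List String) :
    pvFindLast key dflt (xs ++ ys) = pvFindLast key (pvFindLast key dflt ys) xs := by
  induction xs with
  | nil => rfl
  | cons x xs ih =>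
    simp only [List.cons_append, pvFindLast]
    by_cases h : 2 ≤ (PySem.Str.split₀ ((((PySem.Str.split? x "#").getD []).head?.getD ""))).length ∧
        PySem.Str.lower ((PySem.Str.split₀ ((((PySem.Str.split? x "#").getD []).head?.getD ""))).head?.getD "") = key <;>
      simp [h, ih]

-- the loop invariant: A's fold from (s, c) equals the two backward searches with defaults s, c
theorem pv_loop_inv (INPUT : List String) (s c : String) :
    INPUT.foldl (fun (st : String × String) iline =>
      let sline := PySem.Str.split₀ ((((PySem.Str.split? iline "#").getD []).head?.getD ""))
      match sline with
      | a :: b :: _ =>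
        if PySem.Str.lower a = "suffix" then (PySem.Str.strip b, st.2)
        else if PySem.Str.lower a = "calculation" then (st.1, PySem.Str.strip b)
        else st
      | _ => st) (s, c)
    = (pvFindLast "suffix" s INPUT.reverse, pvFindLast "calculation" c INPUT.reverse) := by
  induction INPUT generalizing s c with
  | nil => rfl
  | cons iline rest ih =>
    simp only [List.foldl_cons, List.reverse_cons, pvFindLast_append]
    cases hs : PySem.Str.split₀ ((((PySem.Str.split? iline "#").getD []).head?.getD "")) with
    | nil => simp [hs, ih, pvFindLast]
    | cons a tl =>
      cases tl with
      | nil => simp [hs, ih, pvFindLast]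
      | cons b tl' =>
        by_cases h1 : PySem.Str.lower a = "suffix"
        · have h2 : PySem.Str.lower a ≠ "calculation" := by simp [h1]
          simp [hs, h1, ih, pvFindLast]
        · by_cases h2 : PySem.Str.lower a = "calculation"
          · simp [hs, h2, ih, pvFindLast]
          · simp [hs, h1, h2, ih, pvFindLast]

-- ===== VERDICT (by name: the statement is the Claim_ definition above) =====
theorem get_suffix_calculation_spec : Claim_equal_get_suffix_calculation := by
  intro INPUT _
  unfold Spec_get_suffix_calculation get_suffix_calculation get_suffix_calculation_alt
  exact pv_loop_inv INPUT "ABACUS" "scf"
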